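-- pv_equiv track=rewrite | github.com/ArchonMegalon/executive-assistant | scripts/chummer6_guide_media_worker.py | _normalized_provider_order
-- ===== SOURCE A (Python) =====
-- def _normalized_provider_order(values: list[str]) -> list[str]:
--     normalized: list[str] = []
--     deferred_onemin: list[str] = []
--     for raw in values:
--         value = str(raw or "").strip().lower().replace("-", "_")
--         if not value:
--             continue
--         target = deferred_onemin if value in {"onemin", "1min", "1min_ai", "oneminai"} else normalized
--         if value not in normalized and value not in deferred_onemin:
--             target.append(value)
--     return normalized + deferred_onemin
-- ===== SOURCE B (Python) =====
-- _ONEMIN = {"onemin", "1min", "1min_ai", "oneminai"}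
--
--
-- def _normalized_provider_order(values: list[str]) -> list[str]:
--     cleaned = (str(raw or "").strip().lower().replace("-", "_") for raw in values)
--     return sorted(dict.fromkeys(v for v in cleaned if v),
--                   key=lambda v: v in _ONEMIN)
-- ===== Notes on version B (the rewrite author's own statement) =====
-- stated objective: faster
-- what changed: A routes each normalized value into one of two bucket lists inside a single loop, deduplicating by scanning both buckets, then concatenates; B builds the deduped normalized stream with a generator + dict.fromkeys and recovers the same order by a stable sort keyed on ONEMIN membership.
import Mathlib
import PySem

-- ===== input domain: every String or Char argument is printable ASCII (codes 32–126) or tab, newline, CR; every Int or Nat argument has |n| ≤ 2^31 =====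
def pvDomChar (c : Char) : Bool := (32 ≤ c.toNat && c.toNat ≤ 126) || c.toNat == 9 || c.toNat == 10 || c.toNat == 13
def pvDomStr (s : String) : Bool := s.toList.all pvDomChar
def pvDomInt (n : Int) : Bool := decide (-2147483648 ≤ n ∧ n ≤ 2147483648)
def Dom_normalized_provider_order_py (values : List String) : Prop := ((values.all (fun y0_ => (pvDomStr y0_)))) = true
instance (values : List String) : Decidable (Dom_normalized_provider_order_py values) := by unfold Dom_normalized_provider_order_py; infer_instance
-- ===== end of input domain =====

-- B replaces A's two-bucket routing loop by dict.fromkeys dedup followed by a stable sort keyed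
-- on ONEMIN membership (objective: faster, measured).

-- shared helper: value = str(raw or "").strip().lower().replace("-", "_")
def pvNorm (raw : String) : String :=
  PySem.Str.replace (PySem.Str.lower (PySem.Str.strip raw)) "-" "_"

-- the ONEMIN set literal {"onemin", "1min", "1min_ai", "oneminai"}
def pvOnemin : List String := ["onemin", "1min", "1min_ai", "oneminai"]

-- ===== PORT A =====
-- loop body of A: normalize, skip blanks, route into (normalized, deferred_onemin)
def pvStepA (st : List String × List String) (raw : String) : List String × List String :=
  let value := pvNorm raw
  if value = "" then st
  else
    -- target = deferred_onemin if value in ONEMIN else normalized; append if unseen in both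
    if !(st.1.contains value) && !(st.2.contains value) then
      if pvOnemin.contains value then (st.1, st.2 ++ [value])
      else (st.1 ++ [value], st.2)
    else st

def normalized_provider_order_py (values : List String) : List String :=
  let st := values.foldl pvStepA ([], [])
  st.1 ++ st.2

-- ===== PORT B =====
-- sort key `v in _ONEMIN`: Python's bool orders as False < True, ported as Nat 0 < 1
def pvKey (v : String) : Nat := if pvOnemin.contains v then 1 else 0

def normalized_provider_order_py_alt (values : List String) : List String :=
  -- cleaned = (str(raw or "").strip().lower().replace("-", "_") for raw in values), kept if nonempty
  let cleaned := (values.map pvNorm).filter (fun v => v ≠ "")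
  -- sorted(dict.fromkeys(cleaned), key=lambda v: v in _ONEMIN)
  PySem.List.sorted (PySem.List.dedup cleaned) pvKey false

-- ===== PRECONDITION & SPEC =====
def Spec_normalized_provider_order_py (values : List String) (out : List String) : Prop := out = normalized_provider_order_py_alt values
instance (values : List String) (out : List String) : Decidable (Spec_normalized_provider_order_py values out) := by unfold Spec_normalized_provider_order_py; infer_instance

-- ===== CLAIM (what is proved, stated in full; the proofs are below) =====
def Claim_equal_normalized_provider_order_py : Prop := ∀ (values : List String), Dom_normalized_provider_order_py values → Spec_normalized_provider_order_py values (normalized_provider_order_py values)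

-- ===== LEMMAS AND PROOFS =====

-- fused dedup step: PySem.Set.add over the normalize+filter stream, expressed over raw values
def pvDedupStep (acc : List String) (raw : String) : List String :=
  let v := pvNorm raw
  if v = "" then acc else if acc.contains v then acc else acc ++ [v]

-- insertBy skips a prefix it is not `before`
theorem pv_insertBy_append (before : String → String → Bool) (x : String) (l r : List String)
    (h : ∀ y ∈ l, before x y = false) :
    PySem.List.insertBy before x (l ++ r) = l ++ PySem.List.insertBy before x r := by
  induction l with
  | nil => rfl
  | cons y l ih =>
    have hy : before x y = false := h y (by simp)
    simp only [List.cons_append, PySem.List.insertBy, hy, Bool.false_eq_true, if_false]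
    rw [ih (fun z hz => h z (by simp [hz]))]

-- insertBy at a head it is `before`
theorem pv_insertBy_cons (before : String → String → Bool) (x y : String) (ys : List String) :
    PySem.List.insertBy before x (y :: ys)
      = if before x y then x :: y :: ys else y :: PySem.List.insertBy before x ys := rfl

-- a stable sort by a 0/1 key is exactly the (false-key, true-key) partition in order
theorem pv_sort01 (xs : List String) :
    PySem.List.sorted xs pvKey false
      = xs.filter (fun v => !(pvOnemin.contains v)) ++ xs.filter (fun v => pvOnemin.contains v) := by
  rw [PySem.List.sorted_eq_foldl_insertBy]
  suffices h : ∀ (c : List String),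
      xs.foldl (fun acc x => PySem.List.insertBy (fun a b => decide (pvKey a < pvKey b)) x acc)
        (c.filter (fun v => !(pvOnemin.contains v)) ++ c.filter (fun v => pvOnemin.contains v))
        = (c ++ xs).filter (fun v => !(pvOnemin.contains v)) ++ (c ++ xs).filter (fun v => pvOnemin.contains v) by
    simpa using h []
  induction xs with
  | nil => intro c; simp
  | cons x xs ih =>
    intro c
    simp only [List.foldl_cons]
    have hstep :
        PySem.List.insertBy (fun a b => decide (pvKey a < pvKey b)) x
          (c.filter (fun v => !(pvOnemin.contains v)) ++ c.filter (fun v => pvOnemin.contains v))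
          = (c ++ [x]).filter (fun v => !(pvOnemin.contains v)) ++ (c ++ [x]).filter (fun v => pvOnemin.contains v) := by
      by_cases hx : x ∈ pvOnemin
      · -- key x = 1: never before anything; lands at the very end
        rw [PySem.List.insertBy_of_forall_not_before]
        · simp [List.filter_append, hx, List.append_assoc]
        · intro y _
          by_cases hy : y ∈ pvOnemin <;> simp [pvKey, hx, hy]
      · -- key x = 0: skips the key-0 prefix, inserted before the first key-1 element
        rw [pv_insertBy_append]
        · have hins : PySem.List.insertBy (fun a b => decide (pvKey a < pvKey b)) x
              (c.filter (fun v => pvOnemin.contains v)) = x :: c.filter (fun v => pvOnemin.contains v) := by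
            cases hq : c.filter (fun v => pvOnemin.contains v) with
            | nil => rfl
            | cons z t =>
              have hz : z ∈ pvOnemin := by
                have := List.mem_filter.mp (hq ▸ List.mem_cons_self (l := t))
                simpa using this.2
              rw [pv_insertBy_cons]
              simp [pvKey, hx, hz]
          rw [hins]
          simp [List.filter_append, hx]
        · intro y hy
          have hy' : ¬ y ∈ pvOnemin := by
            have := (List.mem_filter.mp hy).2
            simpa using this
          simp [pvKey, hx, hy']
    rw [hstep, ih (c ++ [x])]
    simp
-- dedup of the normalize+filter stream = fused fold over the raw values
theorem pv_dedup_fused (values : List String) :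
    ∀ (acc : List String),
      ((values.map pvNorm).filter (fun v => v ≠ "")).foldl PySem.Set.add acc
        = values.foldl pvDedupStep acc := by
  induction values with
  | nil => intro acc; simp
  | cons raw rest ih =>
    intro acc
    by_cases hv : pvNorm raw = ""
    · have hf : ((raw :: rest).map pvNorm).filter (fun v => v ≠ "")
          = ((rest.map pvNorm).filter (fun v => v ≠ "")) := by
        simp [hv]
      rw [hf, ih, List.foldl_cons,
        show pvDedupStep acc raw = acc by simp [pvDedupStep, hv]]
    · have hf : ((raw :: rest).map pvNorm).filter (fun v => v ≠ "")
          = pvNorm raw :: ((rest.map pvNorm).filter (fun v => v ≠ "")) := by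
        simp [hv]
      rw [hf, List.foldl_cons, List.foldl_cons, ih,
        show PySem.Set.add acc (pvNorm raw) = pvDedupStep acc raw by
          simp only [PySem.Set.add, pvDedupStep, if_neg hv]
          rfl]

-- A's loop, started on the partition of a deduped prefix, tracks the fused dedup fold
theorem pv_loopA (values : List String) :
    ∀ (c : List String),
      values.foldl pvStepA (c.filter (fun v => !(pvOnemin.contains v)), c.filter (fun v => pvOnemin.contains v))
        = ((values.foldl pvDedupStep c).filter (fun v => !(pvOnemin.contains v)),
           (values.foldl pvDedupStep c).filter (fun v => pvOnemin.contains v)) := by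
  induction values with
  | nil => intro c; rfl
  | cons raw rest ih =>
    intro c
    simp only [List.foldl_cons]
    by_cases hv : pvNorm raw = ""
    · rw [show pvStepA (c.filter (fun v => !(pvOnemin.contains v)), c.filter (fun v => pvOnemin.contains v)) raw
            = (c.filter (fun v => !(pvOnemin.contains v)), c.filter (fun v => pvOnemin.contains v)) by
          simp [pvStepA, hv],
        show pvDedupStep c raw = c by simp [pvDedupStep, hv]]
      exact ih c
    · by_cases hin : pvNorm raw ∈ c
      · rw [show pvStepA (c.filter (fun v => !(pvOnemin.contains v)), c.filter (fun v => pvOnemin.contains v)) raw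
              = (c.filter (fun v => !(pvOnemin.contains v)), c.filter (fun v => pvOnemin.contains v)) by
            by_cases hone : pvNorm raw ∈ pvOnemin <;>
              simp [pvStepA, hv, List.mem_filter, hin, hone],
          show pvDedupStep c raw = c by simp [pvDedupStep, hv, hin]]
        exact ih c
      · rw [show pvDedupStep c raw = c ++ [pvNorm raw] by simp [pvDedupStep, hv, hin],
          show pvStepA (c.filter (fun v => !(pvOnemin.contains v)), c.filter (fun v => pvOnemin.contains v)) raw
              = ((c ++ [pvNorm raw]).filter (fun v => !(pvOnemin.contains v)),
                 (c ++ [pvNorm raw]).filter (fun v => pvOnemin.contains v)) by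
            by_cases hone : pvNorm raw ∈ pvOnemin <;>
              simp [pvStepA, hv, List.mem_filter, hin, hone, List.filter_append]]
        exact ih (c ++ [pvNorm raw])

-- ===== VERDICT (by name: the statement is the Claim_ definition above) =====
theorem normalized_provider_order_py_spec : Claim_equal_normalized_provider_order_py := by
  intro values _
  unfold Spec_normalized_provider_order_py normalized_provider_order_py normalized_provider_order_py_alt
  rw [pv_sort01]
  have hd : PySem.List.dedup ((values.map pvNorm).filter (fun v => v ≠ ""))
      = values.foldl pvDedupStep [] := by
    simpa [PySem.List.dedup, PySem.Set.ofList] using pv_dedup_fused values []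
  rw [hd]
  have := pv_loopA values []
  simp only [List.filter_nil] at this
  rw [this]
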